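-- pv_equiv track=rewrite | github.com/RedStarWithGit/my-leetcode | problems/03143.py | count_okay_points
-- ===== SOURCE A (Python) =====
-- from typing import List
-- from typing import Set
--
-- def count_okay_points(new_labels: List[str], used_labels: Set[str]):
--     origin = len(new_labels)
--     new_labels = set(new_labels)
--     if origin != len(new_labels):
--         return 0
--
--     for label in new_labels:
--         if label in used_labels:
--             return 0
--
--     used_labels.update(new_labels)
--     return len(new_labels)
-- ===== SOURCE B (Python) =====
-- def count_okay_points(new_labels, used_labels):
--     # brute-force pairwise check, structural recursion, no auxiliary set
--     def check(lst):
--         if not lst: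
--             return True
--         head, rest = lst[0], lst[1:]
--         if head in used_labels:
--             return False
--         for x in rest:
--             if x == head:
--                 return False
--         return check(rest)
--     if check(new_labels):
--         used_labels.update(new_labels)
--         return len(new_labels)
--     return 0
-- ===== Notes on version B (the rewrite author's own statement) =====
-- stated objective: alternative
-- what changed: Drops A's hash-set machinery (build set, compare lengths for duplicates, membership scan) entirely: B is a structural recursion over the list that detects duplicates by brute-force pairwise comparison of each head against its tail and checks each head against used_labels directly, trading O(n) expected hashing for O(n^2) comparisons.
import Mathlib
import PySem

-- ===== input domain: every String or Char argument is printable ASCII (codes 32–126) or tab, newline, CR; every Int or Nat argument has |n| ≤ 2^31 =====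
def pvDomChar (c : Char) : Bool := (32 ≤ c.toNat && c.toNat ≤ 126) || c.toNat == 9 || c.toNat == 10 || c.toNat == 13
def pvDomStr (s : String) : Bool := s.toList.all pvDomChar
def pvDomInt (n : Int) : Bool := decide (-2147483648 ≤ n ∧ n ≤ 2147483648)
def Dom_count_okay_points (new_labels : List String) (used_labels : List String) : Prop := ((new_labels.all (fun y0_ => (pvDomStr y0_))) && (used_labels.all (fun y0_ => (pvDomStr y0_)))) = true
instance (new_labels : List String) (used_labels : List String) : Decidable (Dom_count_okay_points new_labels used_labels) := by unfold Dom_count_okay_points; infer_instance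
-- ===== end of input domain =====

-- B replaces A's hash-set approach by a structural recursion with brute-force pairwise duplicate
-- detection (no auxiliary set); both Pythons mutate used_labels identically on success, the
-- theorems are about the RETURN value only.

-- ===== PORT A =====
-- A's 'for label in new_labels: if label in used_labels: return 0' over the deduplicated set
-- (order-independent result, so iterating the Set's list is exact).
def pvLoopA : List String → List String → Bool
  | [], _ => false
  | l :: rest, used => if used.contains l then true else pvLoopA rest used

def count_okay_points (new_labels : List String) (used_labels : List String) : Int :=
  let origin : Int := PySem.List.len new_labels
  let s : PySem.Set String := PySem.Set.ofList new_labels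
  if origin ≠ PySem.Set.len s then 0
  else if pvLoopA s used_labels then 0
  else PySem.Set.len s

-- ===== PORT B =====
-- 'for x in rest: if x == head: return False'
def pvScanEq : List String → String → Bool
  | [], _ => false
  | x :: rest, h => if x = h then true else pvScanEq rest h

-- B's recursive check: head fresh w.r.t. used_labels, head not repeated in the tail, recurse
def pvCheck (used : List String) : List String → Bool
  | [] => true
  | head :: rest =>
    if used.contains head then false
    else if pvScanEq rest head then false
    else pvCheck used rest

def count_okay_points_alt (new_labels : List String) (used_labels : List String) : Int :=
  if pvCheck used_labels new_labels then PySem.List.len new_labels else 0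

-- ===== PRECONDITION & SPEC =====
def Spec_count_okay_points (new_labels : List String) (used_labels : List String) (out : Int) : Prop := out = count_okay_points_alt new_labels used_labels
instance (new_labels : List String) (used_labels : List String) (out : Int) : Decidable (Spec_count_okay_points new_labels used_labels out) := by unfold Spec_count_okay_points; infer_instance

-- ===== CLAIM =====
def Claim_equal_count_okay_points : Prop := ∀ (new_labels : List String) (used_labels : List String), Dom_count_okay_points new_labels used_labels → Spec_count_okay_points new_labels used_labels (count_okay_points new_labels used_labels)

-- ===== LEMMAS AND PROOFS =====

-- reference value: count iff no duplicates and no collision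
def pvRef (nl ul : List String) : Int :=
  if nl.Nodup ∧ ∀ x ∈ nl, x ∉ ul then (nl.length : Int) else 0

theorem pvLoopA_eq_any (s ul : List String) : pvLoopA s ul = s.any (fun x => ul.contains x) := by
  induction s with
  | nil => rfl
  | cons l rest ih => simp only [pvLoopA, ih, List.any_cons]; split_ifs <;> simp_all

theorem length_ofList_eq_iff (nl : List String) :
    (PySem.Set.ofList nl).length = nl.length ↔ nl.Nodup := by
  constructor
  · intro h
    have hto : (PySem.Set.ofList nl).toFinset = nl.toFinset := by
      ext x; simp [List.mem_toFinset, PySem.Set.mem_ofList]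
    have h1 : (PySem.Set.ofList nl).toFinset.card = (PySem.Set.ofList nl).length :=
      List.toFinset_card_of_nodup (PySem.Set.nodup_ofList nl)
    have h2 : nl.toFinset.card = nl.dedup.length := List.card_toFinset nl
    have hlen : nl.dedup.length = nl.length := by
      rw [← h2, ← hto, h1, h]
    have := List.Sublist.eq_of_length (List.dedup_sublist nl) hlen
    rw [← this]; exact List.nodup_dedup nl
  · intro h; rw [PySem.Set.ofList_eq_self_of_nodup nl h]

theorem pvScanEq_eq (rest : List String) (h : String) :
    pvScanEq rest h = rest.contains h := by
  induction rest with
  | nil => rfl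
  | cons x r ih =>
    simp only [pvScanEq, ih, List.contains_cons]
    split_ifs with hx
    · simp [hx]
    · have hb : (h == x) = false := beq_false_of_ne (fun he => hx he.symm)
      rw [hb, Bool.false_or]

theorem pvCheck_iff (ul nl : List String) :
    pvCheck ul nl = true ↔ nl.Nodup ∧ ∀ x ∈ nl, x ∉ ul := by
  induction nl with
  | nil => simp [pvCheck]
  | cons head rest ih =>
    simp only [pvCheck, pvScanEq_eq]
    split_ifs with h1 h2
    · simp only [Bool.false_eq_true, false_iff]
      rintro ⟨_, h⟩; exact h head (by simp) (by simpa using h1)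
    · simp only [Bool.false_eq_true, false_iff]
      rintro ⟨hnd, _⟩; exact (List.nodup_cons.1 hnd).1 (by simpa using h2)
    · rw [ih]
      constructor
      · rintro ⟨hnd, hcol⟩
        refine ⟨List.nodup_cons.2 ⟨by simpa using h2, hnd⟩, ?_⟩
        intro x hx
        rcases List.mem_cons.1 hx with rfl | hx
        · simpa using h1
        · exact hcol x hx
      · rintro ⟨hnd, hcol⟩
        exact ⟨(List.nodup_cons.1 hnd).2, fun x hx => hcol x (List.mem_cons_of_mem _ hx)⟩

theorem alt_eq_ref (nl ul : List String) : count_okay_points_alt nl ul = pvRef nl ul := by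
  unfold count_okay_points_alt pvRef
  by_cases h : nl.Nodup ∧ ∀ x ∈ nl, x ∉ ul
  · rw [if_pos ((pvCheck_iff ul nl).2 h), if_pos h]; simp [PySem.List.len_eq]
  · rw [if_neg (fun hc => h ((pvCheck_iff ul nl).1 hc)), if_neg h]

theorem a_eq_ref (nl ul : List String) : count_okay_points nl ul = pvRef nl ul := by
  unfold count_okay_points pvRef
  simp only [PySem.List.len_eq, PySem.Set.len, ne_eq]
  by_cases hnd : nl.Nodup
  · rw [if_neg (by rw [(length_ofList_eq_iff nl).2 hnd]; simp)]
    rw [pvLoopA_eq_any]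
    by_cases hcol : ∀ x ∈ nl, x ∉ ul
    · rw [if_neg, if_pos ⟨hnd, hcol⟩]
      · simp [PySem.Set.ofList_eq_self_of_nodup nl hnd]
      · intro hA
        obtain ⟨x, hx, hc⟩ := List.any_eq_true.1 hA
        exact hcol x ((PySem.Set.mem_ofList nl x).1 hx) (by simpa using hc)
    · push Not at hcol
      obtain ⟨x, hx, hxu⟩ := hcol
      rw [if_pos, if_neg (by rintro ⟨_, h⟩; exact h x hx hxu)]
      simp only [List.any_eq_true]
      exact ⟨x, (PySem.Set.mem_ofList nl x).2 hx, by simpa using hxu⟩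
  · rw [if_pos, if_neg (by rintro ⟨h, _⟩; exact hnd h)]
    intro h
    exact hnd ((length_ofList_eq_iff nl).1 (by exact_mod_cast h.symm))

-- ===== VERDICT =====
theorem count_okay_points_spec : Claim_equal_count_okay_points := by
  intro nl ul _
  unfold Spec_count_okay_points
  rw [a_eq_ref, alt_eq_ref]
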